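-- pv_equiv track=rewrite | github.com/Mgobeaalcoba/python_fundamentals | Programación 1 - Verano 2021/Ejercicio 2 1° Parcial Gobea Alcoba, Mariano.py | analizar_secundaria
-- ===== SOURCE A (Python) =====
-- def analizar_secundaria(matriz):
--     """ Calcula el máximo y el minimo
--     entre los valores introducidos en
--     la diagonal secundaria de la matriz. """
--     secundaria=[]
--     filas=len(matriz)
--     columnas=len(matriz[0])
--     c=columnas-1
--     for f in range(filas):
--         secundaria.append(matriz[f][c])
--         c -= 1
--     maximo=max(secundaria)
--     minimo=min(secundaria)
--     return maximo , minimo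
-- ===== SOURCE B (Python) =====
-- def analizar_secundaria(matriz):
--     """Max and min of the secondary diagonal, in one fused pass
--     (no intermediate list, no separate max/min scans)."""
--     filas = len(matriz)
--     columnas = len(matriz[0])
--     maximo = minimo = matriz[0][columnas - 1]
--     for f in range(1, filas):
--         val = matriz[f][columnas - 1 - f]
--         if val > maximo:
--             maximo = val
--         if val < minimo:
--             minimo = val
--     return maximo, minimo
-- ===== Notes on version B (the rewrite author's own statement) =====
-- stated objective: alternative
-- what changed: B replaces A's build-a-diagonal-list-then-scan-it-twice-with-max-and-min structure by a single fused pass that indexes matriz[f][columnas-1-f] directly and maintains running maximo/minimo accumulators, never materialising the list.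
import Mathlib
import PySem

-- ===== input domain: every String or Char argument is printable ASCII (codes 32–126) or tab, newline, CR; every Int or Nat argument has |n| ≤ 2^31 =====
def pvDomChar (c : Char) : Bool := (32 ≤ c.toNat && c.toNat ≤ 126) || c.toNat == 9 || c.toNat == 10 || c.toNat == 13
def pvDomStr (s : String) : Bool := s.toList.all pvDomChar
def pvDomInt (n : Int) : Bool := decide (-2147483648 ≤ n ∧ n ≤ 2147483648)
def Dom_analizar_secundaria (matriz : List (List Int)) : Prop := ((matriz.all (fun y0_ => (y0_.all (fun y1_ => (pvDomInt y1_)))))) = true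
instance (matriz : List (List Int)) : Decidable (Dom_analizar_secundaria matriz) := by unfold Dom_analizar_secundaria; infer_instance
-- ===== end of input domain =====

-- B replaces A's build-diagonal-list-then-two-scans (max, min) by one fused
-- accumulator pass over the rows; same index arithmetic, no intermediate list.

-- ===== PORT A =====
def analizar_secundaria (matriz : List (List Int)) : Int × Int :=
  let filas : Int := matriz.length
  let columnas : Int := ((PySem.List.pyGet? matriz 0).getD []).length
  let st :=
    (PySem.List.pyRange 0 filas 1).foldl
      (fun (st : List Int × Int) f =>
        (st.1 ++ [PySem.List.pyGetD (PySem.List.pyGetD matriz f []) st.2 0], st.2 - 1))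
      ([], columnas - 1)
  ((PySem.List.max? st.1 (fun y => y)).getD 0,
   (PySem.List.min? st.1 (fun y => y)).getD 0)

-- ===== PORT B =====
def analizar_secundaria_alt (matriz : List (List Int)) : Int × Int :=
  let filas : Int := matriz.length
  let columnas : Int := ((PySem.List.pyGet? matriz 0).getD []).length
  let first : Int := PySem.List.pyGetD (PySem.List.pyGetD matriz 0 []) (columnas - 1) 0
  (PySem.List.pyRange 1 filas 1).foldl
    (fun (mm : Int × Int) f =>
      let val := PySem.List.pyGetD (PySem.List.pyGetD matriz f []) (columnas - 1 - f) 0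
      (if val > mm.1 then val else mm.1, if val < mm.2 then val else mm.2))
    (first, first)

-- ===== PRECONDITION & SPEC =====
-- Pre_ excludes exactly the inputs where the Python raises IndexError: the empty
-- matrix (matriz[0]) and matrices where some secondary-diagonal index is out of
-- range for its row (Python's negative-index wraparound counts as in range).
def Pre_analizar_secundaria (matriz : List (List Int)) : Prop :=
  matriz ≠ [] ∧ ∀ f < matriz.length,
    PySem.Raise.InRange (matriz.getD f []).length
      (((matriz.headD []).length : Int) - 1 - f)
instance (matriz : List (List Int)) : Decidable (Pre_analizar_secundaria matriz) := by
  unfold Pre_analizar_secundaria; infer_instance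
def pvWitness_analizar_secundaria : List (List Int) := [[1, 2], [3, 4]]
def Spec_analizar_secundaria (matriz : List (List Int)) (out : Int × Int) : Prop := out = analizar_secundaria_alt matriz
instance (matriz : List (List Int)) (out : Int × Int) : Decidable (Spec_analizar_secundaria matriz out) := by unfold Spec_analizar_secundaria; infer_instance

-- ===== CLAIM (what is proved, stated in full; the proofs are below) =====
def Claim_equal_analizar_secundaria : Prop := ∀ (matriz : List (List Int)), Dom_analizar_secundaria matriz → Pre_analizar_secundaria matriz → Spec_analizar_secundaria matriz (analizar_secundaria matriz)

-- ===== LEMMAS AND PROOFS =====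

-- value at row f of the secondary diagonal, C = columnas - 1
def pvG (matriz : List (List Int)) (C f : Int) : Int :=
  PySem.List.pyGetD (PySem.List.pyGetD matriz f []) (C - f) 0

-- A's loop: the accumulated list is the mapped range; the counter tracks C - f.
lemma pvA_fold (matriz : List (List Int)) (C : Int) (n : Nat) :
    ∀ (a : Int) (sec : List Int),
      (PySem.List.pyRange a (a + n) 1).foldl
        (fun (st : List Int × Int) f =>
          (st.1 ++ [PySem.List.pyGetD (PySem.List.pyGetD matriz f []) st.2 0], st.2 - 1))
        (sec, C - a)
      = (sec ++ (PySem.List.pyRange a (a + n) 1).map (pvG matriz C), C - (a + n)) := by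
  induction n with
  | zero =>
      intro a sec
      rw [PySem.List.pyRange_one_eq_nil (by omega)]
      simp
  | succ m ih =>
      intro a sec
      rw [PySem.List.pyRange_one_cons (by omega : a < a + (m + 1 : Nat))]
      have h1 : (a : Int) + (m + 1 : Nat) = (a + 1) + (m : Nat) := by push_cast; ring
      simp only [List.foldl_cons, List.map_cons]
      rw [h1]
      have := ih (a + 1) (sec ++ [PySem.List.pyGetD (PySem.List.pyGetD matriz a []) (C - a) 0])
      rw [show C - (a + 1) = C - a - 1 by ring] at this
      rw [this]
      simp [pvG]

-- B's loop is the pair of running max/min folds.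
lemma pvB_fold (g : Int → Int) (l : List Int) :
    ∀ (mx mn : Int),
      l.foldl
        (fun (mm : Int × Int) f =>
          (if g f > mm.1 then g f else mm.1, if g f < mm.2 then g f else mm.2))
        (mx, mn)
      = (l.foldl (fun m f => max m (g f)) mx, l.foldl (fun m f => min m (g f)) mn) := by
  induction l with
  | nil => intro mx mn; rfl
  | cons x t ih =>
      intro mx mn
      simp only [List.foldl_cons]
      rw [show (if g x > mx then g x else mx) = max mx (g x) by omega,
          show (if g x < mn then g x else mn) = min mn (g x) by omega, ih]

-- ===== VERDICT (by name: the statement is the Claim_ definition above) =====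
theorem analizar_secundaria_spec : Claim_equal_analizar_secundaria := by
  intro matriz _ hpre
  unfold Spec_analizar_secundaria analizar_secundaria analizar_secundaria_alt
  dsimp only
  obtain ⟨hne, -⟩ := hpre
  have hn : 0 < matriz.length := List.length_pos_iff.mpr hne
  set C : Int := (((PySem.List.pyGet? matriz 0).getD []).length : Int) - 1 with hC
  -- A's loop result
  have hA := pvA_fold matriz C matriz.length 0 []
  rw [show C - (0 : Int) = C by ring] at hA
  simp only [zero_add] at hA
  rw [hA]
  -- split the range at its head
  have hcons : PySem.List.pyRange 0 (matriz.length : Int) 1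
      = 0 :: PySem.List.pyRange 1 (matriz.length : Int) 1 := by
    rw [PySem.List.pyRange_one_cons (by exact_mod_cast hn)]
    norm_num
  rw [hcons]
  simp only [List.map_cons, List.nil_append]
  rw [PySem.List.max?_id_cons, PySem.List.min?_id_cons]
  rw [pvB_fold (fun f => PySem.List.pyGetD (PySem.List.pyGetD matriz f []) (C - f) 0)
        (PySem.List.pyRange 1 (matriz.length : Int) 1)]
  simp only [Option.getD_some, pvG, sub_zero, List.foldl_map]
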